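-- pv_equiv track=rewrite | github.com/zigpy/zha-websocket-server | zhaws/server/platforms/fan/__init__.py | percentage_to_ordered_list_item
-- ===== SOURCE A (Python) =====
-- from typing import TYPE_CHECKING, Any, Final, TypeVar
--
-- T = TypeVar("T")
--
-- def percentage_to_ordered_list_item(ordered_list: list[T], percentage: int) -> T:
--     """Find the item that most closely matches the percentage in an ordered list.
--
--     When using this utility for fan speeds, do not include "off"
--
--     Given the list: ["low", "medium", "high", "very_high"], this
--     function will return the following when when the item is passed
--     in:
--
--         1-25: low
--         26-50: medium
--         51-75: high
--         76-100: very_high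
--     """
--     if not (list_len := len(ordered_list)):
--         raise ValueError("The ordered list is empty")
--
--     for offset, speed in enumerate(ordered_list):
--         list_position = offset + 1
--         upper_bound = (list_position * 100) // list_len
--         if percentage <= upper_bound:
--             return speed
--
--     return ordered_list[-1]
-- ===== SOURCE B (Python) =====
-- def percentage_to_ordered_list_item(ordered_list, percentage):
--     """Closed-form bucket index via ceiling division instead of scanning."""
--     n = len(ordered_list)
--     if not n:
--         raise ValueError("The ordered list is empty")
--     idx = -((-percentage * n) // 100) - 1
--     return ordered_list[min(n - 1, max(0, idx))]
-- ===== Notes on version B (the rewrite author's own statement) =====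
-- stated objective: faster
-- what changed: Replaced A's linear scan over enumerated buckets with a closed-form index computed by one ceiling division, clamped to the list bounds.
import Mathlib
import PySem

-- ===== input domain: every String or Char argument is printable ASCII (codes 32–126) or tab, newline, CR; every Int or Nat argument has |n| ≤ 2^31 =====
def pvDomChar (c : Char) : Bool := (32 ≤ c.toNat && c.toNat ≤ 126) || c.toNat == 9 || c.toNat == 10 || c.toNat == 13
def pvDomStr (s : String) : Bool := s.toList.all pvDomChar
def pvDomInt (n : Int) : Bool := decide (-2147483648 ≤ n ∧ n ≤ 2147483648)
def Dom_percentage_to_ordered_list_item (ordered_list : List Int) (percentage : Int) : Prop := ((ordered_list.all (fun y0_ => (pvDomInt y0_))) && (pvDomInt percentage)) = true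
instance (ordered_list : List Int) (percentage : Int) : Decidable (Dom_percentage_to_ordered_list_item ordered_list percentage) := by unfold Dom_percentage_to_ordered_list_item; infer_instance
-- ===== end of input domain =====

-- B replaces A's linear scan over the buckets by a closed-form index computed with one
-- ceiling division (objective: faster, O(1) vs O(n) in the list length).

-- ===== PORT A =====
-- the 'for offset, speed in enumerate(ordered_list)' loop: returns some speed on early return
def pvALoop (percentage n : Int) : List Int → Int → Option Int
  | [], _ => none
  | speed :: rest, offset =>
    let list_position := offset + 1
    let upper_bound := PySem.Int.floordiv (list_position * 100) n
    if percentage ≤ upper_bound then some speed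
    else pvALoop percentage n rest (offset + 1)

def percentage_to_ordered_list_item (ordered_list : List Int) (percentage : Int) : Int :=
  let list_len : Int := ordered_list.length
  if list_len = 0 then 0   -- Python raises ValueError here; excluded by Pre_
  else
    match pvALoop percentage list_len ordered_list 0 with
    | some speed => speed
    | none => (PySem.List.pyGet? ordered_list (-1)).getD 0

-- ===== PORT B =====
def percentage_to_ordered_list_item_alt (ordered_list : List Int) (percentage : Int) : Int :=
  let n : Int := ordered_list.length
  if n = 0 then 0   -- Python raises ValueError here; excluded by Pre_
  else
    let idx := -(PySem.Int.floordiv (-percentage * n) 100) - 1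
    (PySem.List.pyGet? ordered_list (min (n - 1) (max 0 idx))).getD 0

-- ===== PRECONDITION & SPEC =====
-- A raises ValueError on the empty list; Pre_ excludes exactly that input.
def Pre_percentage_to_ordered_list_item (ordered_list : List Int) (percentage : Int) : Prop := ordered_list ≠ []
instance (ordered_list : List Int) (percentage : Int) : Decidable (Pre_percentage_to_ordered_list_item ordered_list percentage) := by unfold Pre_percentage_to_ordered_list_item; infer_instance
def pvWitness_percentage_to_ordered_list_item : List Int × Int := ([1, 2, 3, 4], 60)

def Spec_percentage_to_ordered_list_item (ordered_list : List Int) (percentage : Int) (out : Int) : Prop := out = percentage_to_ordered_list_item_alt ordered_list percentage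
instance (ordered_list : List Int) (percentage : Int) (out : Int) : Decidable (Spec_percentage_to_ordered_list_item ordered_list percentage out) := by unfold Spec_percentage_to_ordered_list_item; infer_instance

-- ===== CLAIM (what is proved, stated in full; the proofs are below) =====
def Claim_equal_percentage_to_ordered_list_item : Prop := ∀ (ordered_list : List Int) (percentage : Int), Dom_percentage_to_ordered_list_item ordered_list percentage → Pre_percentage_to_ordered_list_item ordered_list percentage → Spec_percentage_to_ordered_list_item ordered_list percentage (percentage_to_ordered_list_item ordered_list percentage)

-- ===== LEMMAS AND PROOFS =====

-- ceiling bracket for c := -((-p*n) // 100)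
theorem pvCeil_bracket (p n : Int) :
    (-(PySem.Int.floordiv (-p * n) 100) - 1) * 100 < p * n ∧
      p * n ≤ -(PySem.Int.floordiv (-p * n) 100) * 100 := by
  have h := (PySem.Int.neg_floordiv_neg_eq_iff_of_pos (a := p * n) (b := 100)
    (q := -(PySem.Int.floordiv (-(p * n)) 100)) (by norm_num)).mp rfl
  constructor
  · have := h.1
    rw [show -p * n = -(p * n) by ring]
    omega
  · rw [show -p * n = -(p * n) by ring]
    exact h.2

-- the loop returns the element at (0-based, within the suffix) index max 0 (c-1-offset)
theorem pvALoop_eq (p n : Int) (hn : 0 < n) (c : Int)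
    (hc1 : (c - 1) * 100 < p * n) (hc2 : p * n ≤ c * 100) :
    ∀ (xs : List Int) (offset : Int),
      pvALoop p n xs offset = xs[(max 0 (c - 1 - offset)).toNat]? := by
  intro xs
  induction xs with
  | nil => intro offset; simp [pvALoop]
  | cons x rest ih =>
    intro offset
    have hcond : p ≤ PySem.Int.floordiv ((offset + 1) * 100) n ↔ c ≤ offset + 1 := by
      rw [PySem.Int.le_floordiv_iff_mul_le hn]
      constructor
      · intro h; nlinarith
      · intro h
        have : c * 100 ≤ (offset + 1) * 100 := by nlinarith
        omega
    simp only [pvALoop]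
    split_ifs with h
    · have hle : c ≤ offset + 1 := hcond.mp h
      have : (max 0 (c - 1 - offset)).toNat = 0 := by omega
      simp [this]
    · have hgt : offset + 1 < c := by
        by_contra hcon
        exact h (hcond.mpr (by omega))
      have hpos : 1 ≤ c - 1 - offset := by omega
      have : (max 0 (c - 1 - offset)).toNat = (max 0 (c - 1 - (offset + 1))).toNat + 1 := by
        omega
      rw [ih (offset + 1), this]
      simp

theorem percentage_to_ordered_list_item_eq_alt (l : List Int) (p : Int) (hl : l ≠ []) :
    percentage_to_ordered_list_item l p = percentage_to_ordered_list_item_alt l p := by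
  have hlen : (0 : Int) < (l.length : Int) := by
    have : 0 < l.length := List.length_pos_iff.mpr hl
    exact_mod_cast this
  set n : Int := (l.length : Int) with hn
  set c : Int := -(PySem.Int.floordiv (-p * n) 100) with hcdef
  obtain ⟨hc1, hc2⟩ := pvCeil_bracket p n
  have hloop := pvALoop_eq p n hlen c (by omega) (by omega) l 0
  have hne : ¬ n = 0 := by omega
  simp only [percentage_to_ordered_list_item, percentage_to_ordered_list_item_alt, ← hn,
    if_neg hne]
  rw [hloop]
  by_cases hlt : (max 0 (c - 1 - 0)).toNat < l.length
  · -- loop hit: both are the element at index max 0 (c - 1)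
    have hmin : min (n - 1) (max 0 (c - 1)) = max 0 (c - 1 - 0) := by omega
    have hg := PySem.List.pyGet?_of_nonneg (xs := l) (i := max 0 (c - 1 - 0)) (by omega)
    rw [hmin, hg, List.getElem?_eq_getElem hlt]
    simp
  · -- loop fell through: A takes ordered_list[-1], B clamps the index to n - 1
    have hge : l.length ≤ (max 0 (c - 1 - 0)).toNat := by omega
    have hmin : min (n - 1) (max 0 (c - 1)) = n - 1 := by omega
    have hg := PySem.List.pyGet?_of_nonneg (xs := l) (i := n - 1) (by omega)
    rw [hmin, List.getElem?_eq_none (by omega), PySem.List.pyGet?_neg_one, hg]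
    have h1 : (n - 1).toNat = l.length - 1 := by omega
    rw [h1, List.getLast?_eq_getElem?]

-- ===== VERDICT (by name: the statement is the Claim_ definition above) =====
theorem percentage_to_ordered_list_item_spec : Claim_equal_percentage_to_ordered_list_item := by
  intro l p _ hpre
  unfold Spec_percentage_to_ordered_list_item
  exact percentage_to_ordered_list_item_eq_alt l p hpre
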